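-- pv_equiv track=rewrite | github.com/isaac-sim/IsaacLab-Arena | isaaclab_arena/scripts/recon3D_datagen/isaaclab_arena_camera_handler.py | _find_body_index_for_prim
-- ===== SOURCE A (Python) =====
-- def _find_body_index_for_prim(prim_path: str, body_names: list[str]) -> int | None:
--     """Find which articulation body a prim path belongs to.
--
--     Matches the last body name that appears as a path component.
--     """
--     path_parts = prim_path.strip("/").split("/")
--     best_idx: int | None = None
--     best_depth = -1
--     for idx, bname in enumerate(body_names):
--         for depth, part in enumerate(path_parts):
--             if part == bname and depth > best_depth:
--                 best_idx = idx
--                 best_depth = depth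
--     return best_idx
-- ===== SOURCE B (Python) =====
-- def _find_body_index_for_prim(prim_path: str, body_names: list[str]) -> int | None:
--     """Find which articulation body a prim path belongs to.
--
--     Walk the path components from deepest to shallowest and return the index
--     of the first body name matching the current component.
--     """
--     path_parts = prim_path.strip("/").split("/")
--     for part in reversed(path_parts):
--         if part in body_names:
--             return body_names.index(part)
--     return None
-- ===== Notes on version B (the rewrite author's own statement) =====
-- stated objective: simpler
-- what changed: Replaces the nested argmax scan (tracking best index and best depth over all body/part pairs) with a deepest-first walk over the path components that returns the first body-name match via list.index, allowing early exit.
import Mathlib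
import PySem

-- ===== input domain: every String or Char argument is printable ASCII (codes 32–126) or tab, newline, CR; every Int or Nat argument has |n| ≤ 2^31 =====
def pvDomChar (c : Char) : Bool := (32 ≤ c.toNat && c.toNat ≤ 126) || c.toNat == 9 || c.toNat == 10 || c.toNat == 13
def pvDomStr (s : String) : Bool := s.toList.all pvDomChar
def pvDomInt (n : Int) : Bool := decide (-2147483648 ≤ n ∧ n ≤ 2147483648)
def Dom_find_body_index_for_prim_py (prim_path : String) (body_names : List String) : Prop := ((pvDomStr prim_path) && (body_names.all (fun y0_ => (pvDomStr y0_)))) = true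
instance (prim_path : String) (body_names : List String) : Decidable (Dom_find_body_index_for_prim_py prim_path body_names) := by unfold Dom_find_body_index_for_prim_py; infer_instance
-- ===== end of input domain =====

-- B replaces A's nested best-depth argmax scan with a deepest-first walk over the
-- path components that returns the first matching body index (early exit); objective: simpler.

-- ===== PORT A =====
def find_body_index_for_prim_py (prim_path : String) (body_names : List String) : Option Int :=
  let path_parts := (PySem.Str.split? (PySem.Str.stripChars prim_path "/") "/").getD []
  let res :=
    (PySem.List.enumerate body_names 0).foldl
      (fun (st : Option Int × Int) (ib : Int × String) =>
        (PySem.List.enumerate path_parts 0).foldl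
          (fun (st : Option Int × Int) (dp : Int × String) =>
            if dp.2 = ib.2 ∧ dp.1 > st.2 then (some ib.1, dp.1) else st)
          st)
      ((none : Option Int), (-1 : Int))
  res.1

-- ===== PORT B =====
def find_body_index_for_prim_py_alt (prim_path : String) (body_names : List String) : Option Int :=
  let path_parts := (PySem.Str.split? (PySem.Str.stripChars prim_path "/") "/").getD []
  path_parts.reverse.findSome? (fun part =>
    if part ∈ body_names then (PySem.List.index? body_names part).map (fun k => (k : Int))
    else none)

-- ===== PRECONDITION & SPEC =====
def Spec_find_body_index_for_prim_py (prim_path : String) (body_names : List String) (out : Option Int) : Prop := out = find_body_index_for_prim_py_alt prim_path body_names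
instance (prim_path : String) (body_names : List String) (out : Option Int) : Decidable (Spec_find_body_index_for_prim_py prim_path body_names out) := by unfold Spec_find_body_index_for_prim_py; infer_instance

-- ===== CLAIM (what is proved, stated in full; the proofs are below) =====
def Claim_equal_find_body_index_for_prim_py : Prop := ∀ (prim_path : String) (body_names : List String), Dom_find_body_index_for_prim_py prim_path body_names → Spec_find_body_index_for_prim_py prim_path body_names (find_body_index_for_prim_py prim_path body_names)

-- ===== LEMMAS AND PROOFS =====

/-- A's nested fold, abstracted over the already-split path components. -/
def coreA (parts names : List String) : Option Int :=
  ((PySem.List.enumerate names 0).foldl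
      (fun (st : Option Int × Int) (ib : Int × String) =>
        (PySem.List.enumerate parts 0).foldl
          (fun (st : Option Int × Int) (dp : Int × String) =>
            if dp.2 = ib.2 ∧ dp.1 > st.2 then (some ib.1, dp.1) else st)
          st)
      ((none : Option Int), (-1 : Int))).1

/-- B's deepest-first scan, abstracted over the path components. -/
def coreB (parts names : List String) : Option Int :=
  parts.reverse.findSome? (fun part =>
    if part ∈ names then (PySem.List.index? names part).map (fun k => (k : Int))
    else none)

/-- A's inner loop (over the enumerated parts) for one body name. -/
def innerF (parts : List (Int × String)) (ib : Int × String) (s : Option Int × Int) :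
    Option Int × Int :=
  parts.foldl
    (fun (st : Option Int × Int) (dp : Int × String) =>
      if dp.2 = ib.2 ∧ dp.1 > st.2 then (some ib.1, dp.1) else st)
    s

lemma innerF_bound (parts : List (Int × String)) (ib : Int × String) (s : Option Int × Int)
    (c : Int) (hs : s.2 < c) (hp : ∀ dp ∈ parts, dp.1 < c) :
    (innerF parts ib s).2 < c := by
  induction parts generalizing s with
  | nil => simpa [innerF]
  | cons dp l ih =>
    simp only [innerF, List.foldl_cons] at *
    split_ifs with h
    · exact ih _ (hp dp (by simp)) (fun q hq => hp q (by simp [hq]))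
    · exact ih _ hs (fun q hq => hp q (by simp [hq]))

lemma innerF_fixed (parts : List (Int × String)) (ib : Int × String) (s : Option Int × Int)
    (hp : ∀ dp ∈ parts, ¬ dp.1 > s.2) :
    innerF parts ib s = s := by
  induction parts with
  | nil => rfl
  | cons dp l ih =>
    simp only [innerF, List.foldl_cons]
    rw [if_neg (fun h => hp dp (by simp) h.2)]
    exact ih (fun q hq => hp q (by simp [hq]))

/-- If every enumerated depth is below the current best depth, the outer loop is idle. -/
lemma outer_idle (eps : List (Int × String)) (names : List String) (j : Int)
    (s : Option Int × Int) (hp : ∀ dp ∈ eps, ¬ dp.1 > s.2) :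
    (PySem.List.enumerate names j).foldl (fun st ib => innerF eps ib st) s = s := by
  induction names generalizing j with
  | nil => simp [PySem.List.enumerate_nil]
  | cons b rest ih =>
    rw [PySem.List.enumerate_cons, List.foldl_cons, innerF_fixed eps _ s hp]
    exact ih (j + 1)

/-- If `p` occurs in `names` first at position `k`, the outer loop with the extra
    deepest part `(n, p)` appended ends in state `(some (j + k), n)`. -/
lemma outer_found (eps : List (Int × String)) (n : Int) (hp : ∀ dp ∈ eps, dp.1 < n)
    (p : String) (names : List String) (j : Int) (s : Option Int × Int) (hs : s.2 < n)
    (k : Nat) (hk : PySem.List.index? names p = some k) :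
    (PySem.List.enumerate names j).foldl (fun st ib => innerF (eps ++ [(n, p)]) ib st) s
      = (some (j + (k : Int)), n) := by
  induction names generalizing j s k with
  | nil => simp [PySem.List.index?] at hk
  | cons b rest ih =>
    rw [PySem.List.enumerate_cons, List.foldl_cons]
    have hstep : ∀ (ib : Int × String) (t : Option Int × Int),
        innerF (eps ++ [(n, p)]) ib t
          = (if p = ib.2 ∧ n > (innerF eps ib t).2 then (some ib.1, n) else innerF eps ib t) := by
      intro ib t
      simp [innerF, List.foldl_append]
    by_cases hb : b = p
    · subst hb
      have hk0 : k = 0 := by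
        rw [PySem.List.index?_cons_self] at hk
        exact (Option.some_inj.mp hk).symm
      subst hk0
      rw [hstep, if_pos ⟨rfl, innerF_bound eps (j, b) s n hs hp⟩]
      rw [outer_idle _ _ _ _ (by
        intro dp hdp
        rcases List.mem_append.mp hdp with h | h
        · exact not_lt.mpr (le_of_lt (hp dp h))
        · simp at h; simp [h])]
      simp
    · have hb' : p ≠ b := fun h => hb h.symm
      rw [PySem.List.index?_cons_of_ne rest hb] at hk
      rcases Option.map_eq_some_iff.mp hk with ⟨k', hk', rfl⟩
      rw [hstep, if_neg (fun h => hb' h.1)]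
      rw [ih (j + 1) _ (innerF_bound eps (j, b) s n hs hp) k' hk']
      congr 2
      push_cast
      omega

/-- If `p` is not a body name, the appended deepest part never fires. -/
lemma outer_notfound (eps : List (Int × String)) (n : Int) (p : String)
    (names : List String) (j : Int) (s : Option Int × Int) (hnp : p ∉ names) :
    (PySem.List.enumerate names j).foldl (fun st ib => innerF (eps ++ [(n, p)]) ib st) s
      = (PySem.List.enumerate names j).foldl (fun st ib => innerF eps ib st) s := by
  induction names generalizing j s with
  | nil => simp [PySem.List.enumerate_nil]
  | cons b rest ih =>
    rw [PySem.List.enumerate_cons]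
    simp only [List.foldl_cons]
    have : innerF (eps ++ [(n, p)]) (j, b) s = innerF eps (j, b) s := by
      simp only [innerF, List.foldl_append, List.foldl_cons, List.foldl_nil]
      rw [if_neg (fun h => hnp (by simp [h.1]))]
    rw [this]
    exact ih (j + 1) _ (fun h => hnp (List.mem_cons_of_mem _ h))

lemma enum_lt (ps : List String) : ∀ dp ∈ PySem.List.enumerate ps 0, dp.1 < (ps.length : Int) := by
  intro dp hdp
  rcases (PySem.List.mem_enumerate_iff _ _ _).mp hdp with ⟨k, hklt, rfl⟩
  simp only [zero_add]
  exact_mod_cast hklt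

theorem coreA_eq_coreB (parts names : List String) : coreA parts names = coreB parts names := by
  induction parts using List.reverseRecOn with
  | nil =>
    show ((PySem.List.enumerate names 0).foldl
        (fun st ib => innerF (PySem.List.enumerate ([] : List String) 0) ib st)
        ((none : Option Int), (-1 : Int))).1 = coreB [] names
    rw [outer_idle _ _ _ _ (by simp [PySem.List.enumerate_nil])]
    simp [coreB]
  | append_singleton ps p ih =>
    have henum : PySem.List.enumerate (ps ++ [p]) 0
        = PySem.List.enumerate ps 0 ++ [(((ps.length : Int)), p)] := by
      rw [PySem.List.enumerate_append]
      simp [PySem.List.enumerate_cons, PySem.List.enumerate_nil]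
    show ((PySem.List.enumerate names 0).foldl
        (fun st ib => innerF (PySem.List.enumerate (ps ++ [p]) 0) ib st)
        ((none : Option Int), (-1 : Int))).1 = coreB (ps ++ [p]) names
    rw [henum]
    by_cases hp : p ∈ names
    · rcases Option.isSome_iff_exists.mp ((PySem.List.index?_isSome_iff names p).mpr hp) with ⟨k, hk⟩
      rw [outer_found (PySem.List.enumerate ps 0) _ (enum_lt ps) p names 0 _ (by have := Int.natCast_nonneg ps.length; omega) k hk]
      rw [PySem.List.index?_eq_idxOf?] at hk
      simp [coreB, hp, hk]
    · rw [outer_notfound]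
      · show coreA ps names = coreB (ps ++ [p]) names
        rw [ih]
        simp [coreB, hp]
      · exact hp

-- ===== VERDICT (by name: the statement is the Claim_ definition above) =====
theorem find_body_index_for_prim_py_spec : Claim_equal_find_body_index_for_prim_py := by
  intro p ns _
  show find_body_index_for_prim_py p ns = find_body_index_for_prim_py_alt p ns
  unfold find_body_index_for_prim_py find_body_index_for_prim_py_alt
  exact coreA_eq_coreB ((PySem.Str.split? (PySem.Str.stripChars p "/") "/").getD []) ns
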